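-- pv_equiv track=rewrite | github.com/itsjihansyah/review-smart-farma | analyzer.py | cari_data_diare_dewasa
-- ===== SOURCE A (Python) =====
-- gejala = {
--     "g_diare_dewasa": ["k_darurat ABCD","k_diare > 14 hari","k_nyeri perut hebat","k_ada drug induced diarhea","k_tinja berdarah/spt cucian beras","k_demam","k_mual muntah","k_dehidrasi"]
-- }
--
-- def cari_data_diare_dewasa(gejala_found) :
--     indeks_terbesar = 0
--     for i in range(0, len(gejala_found)):
--         gejala_pasien = gejala_found[i]
--         for k in range(0, len(gejala["g_diare_dewasa"])):
--             ket_gejala =  gejala["g_diare_dewasa"][k]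
--             if(gejala_pasien == ket_gejala) :
--                 indeks_terbesar = k
--
--     return indeks_terbesar
-- ===== SOURCE B (Python) =====
-- gejala = {
--     "g_diare_dewasa": ["k_darurat ABCD","k_diare > 14 hari","k_nyeri perut hebat","k_ada drug induced diarhea","k_tinja berdarah/spt cucian beras","k_demam","k_mual muntah","k_dehidrasi"]
-- }
--
-- def cari_data_diare_dewasa(gejala_found):
--     ref = gejala["g_diare_dewasa"]
--     for gp in reversed(gejala_found):
--         if gp in ref:
--             return ref.index(gp)
--     return 0
-- ===== Notes on version B (the rewrite author's own statement) =====
-- stated objective: simpler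
-- what changed: Replaces the exhaustive nested forward scan with an overwrite accumulator by a short-circuiting reverse scan that returns ref.index of the first matching element from the end (last match wins), defaulting to 0.
import Mathlib
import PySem

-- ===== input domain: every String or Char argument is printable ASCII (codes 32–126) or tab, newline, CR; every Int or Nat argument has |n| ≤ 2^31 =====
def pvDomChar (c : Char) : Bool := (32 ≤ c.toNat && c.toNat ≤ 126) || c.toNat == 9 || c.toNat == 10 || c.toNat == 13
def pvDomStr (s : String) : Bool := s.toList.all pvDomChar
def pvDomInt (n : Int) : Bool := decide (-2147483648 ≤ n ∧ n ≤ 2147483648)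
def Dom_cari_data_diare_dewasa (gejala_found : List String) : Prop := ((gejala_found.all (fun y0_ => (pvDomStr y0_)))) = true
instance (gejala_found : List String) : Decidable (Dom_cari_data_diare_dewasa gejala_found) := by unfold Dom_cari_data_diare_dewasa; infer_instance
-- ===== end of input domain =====

-- B replaces A's exhaustive nested forward scan (overwrite accumulator) by a
-- short-circuiting reverse scan returning the reference index of the first
-- match from the end ('simpler'); same return value on every input.

-- the module-level constant gejala["g_diare_dewasa"]
def gejalaRef : List String :=
  ["k_darurat ABCD","k_diare > 14 hari","k_nyeri perut hebat","k_ada drug induced diarhea","k_tinja berdarah/spt cucian beras","k_demam","k_mual muntah","k_dehidrasi"]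

-- ===== PORT A =====
def cari_data_diare_dewasa (gejala_found : List String) : Int :=
  (PySem.List.pyRange 0 gejala_found.length 1).foldl (fun indeks_terbesar i =>
    match PySem.List.pyGet? gejala_found i with
    | none => indeks_terbesar
    | some gejala_pasien =>
      (PySem.List.pyRange 0 gejalaRef.length 1).foldl (fun acc k =>
        match PySem.List.pyGet? gejalaRef k with
        | none => acc
        | some ket_gejala => if gejala_pasien == ket_gejala then k else acc) indeks_terbesar) 0

-- ===== PORT B =====
def cari_alt_go : List String → Int
  | [] => 0
  | gp :: rest =>
    if gp ∈ gejalaRef then (((PySem.List.index? gejalaRef gp).getD 0 : Nat) : Int) else cari_alt_go rest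

def cari_data_diare_dewasa_alt (gejala_found : List String) : Int :=
  cari_alt_go gejala_found.reverse

-- ===== PRECONDITION & SPEC =====
def Spec_cari_data_diare_dewasa (gejala_found : List String) (out : Int) : Prop := out = cari_data_diare_dewasa_alt gejala_found
instance (gejala_found : List String) (out : Int) : Decidable (Spec_cari_data_diare_dewasa gejala_found out) := by unfold Spec_cari_data_diare_dewasa; infer_instance

-- ===== CLAIM (what is proved, stated in full; the proofs are below) =====
def Claim_equal_cari_data_diare_dewasa : Prop := ∀ (gejala_found : List String), Dom_cari_data_diare_dewasa gejala_found → Spec_cari_data_diare_dewasa gejala_found (cari_data_diare_dewasa gejala_found)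

-- ===== LEMMAS AND PROOFS =====

-- the common step function both proofs reduce to
def pvStep (acc : Int) (gp : String) : Int :=
  if gp ∈ gejalaRef then (((PySem.List.index? gejalaRef gp).getD 0 : Nat) : Int) else acc

-- A's inner loop over the 8 reference entries: last overwrite wins; since the
-- reference entries are pairwise distinct this equals "index of gp if present,
-- else the incoming accumulator".
set_option maxHeartbeats 1000000 in
theorem inner_eq (gp : String) (acc : Int) :
    (PySem.List.pyRange 0 gejalaRef.length 1).foldl (fun a k =>
        match PySem.List.pyGet? gejalaRef k with
        | none => a
        | some ket => if gp == ket then k else a) acc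
    = pvStep acc gp := by
  have hr : PySem.List.pyRange 0 (gejalaRef.length : Int) 1 = [0,1,2,3,4,5,6,7] := by decide
  rw [hr]
  simp only [List.foldl,
    show PySem.List.pyGet? gejalaRef 0 = some "k_darurat ABCD" from by decide,
    show PySem.List.pyGet? gejalaRef 1 = some "k_diare > 14 hari" from by decide,
    show PySem.List.pyGet? gejalaRef 2 = some "k_nyeri perut hebat" from by decide,
    show PySem.List.pyGet? gejalaRef 3 = some "k_ada drug induced diarhea" from by decide,
    show PySem.List.pyGet? gejalaRef 4 = some "k_tinja berdarah/spt cucian beras" from by decide,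
    show PySem.List.pyGet? gejalaRef 5 = some "k_demam" from by decide,
    show PySem.List.pyGet? gejalaRef 6 = some "k_mual muntah" from by decide,
    show PySem.List.pyGet? gejalaRef 7 = some "k_dehidrasi" from by decide,
    beq_iff_eq]
  by_cases hm : gp ∈ gejalaRef
  · fin_cases hm <;> simp [pvStep, gejalaRef] <;> decide
  · simp only [gejalaRef, List.mem_cons, List.not_mem_nil, or_false, not_or] at hm
    obtain ⟨h0, h1, h2, h3, h4, h5, h6, h7⟩ := hm
    simp [pvStep, gejalaRef, h0, h1, h2, h3, h4, h5, h6, h7]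

-- A's outer loop is a left fold of pvStep over the input list.
theorem outer_fold (l : List String) :
    cari_data_diare_dewasa l = l.foldl pvStep 0 := by
  unfold cari_data_diare_dewasa
  have hfun : (fun (acc : Int) (i : Int) =>
      match PySem.List.pyGet? l i with
      | none => acc
      | some gp =>
        (PySem.List.pyRange 0 gejalaRef.length 1).foldl (fun a k =>
          match PySem.List.pyGet? gejalaRef k with
          | none => a
          | some ket => if gp == ket then k else a) acc)
      = (fun (acc : Int) (i : Int) => pvStep acc (PySem.List.pyGetD l i "")) := by
    funext acc i
    cases h : PySem.List.pyGet? l i with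
    | none =>
      have : PySem.List.pyGetD l i "" = "" := by
        simp [PySem.List.pyGetD, h]
      simp [this, pvStep, gejalaRef]
    | some gp =>
      have : PySem.List.pyGetD l i "" = gp := by
        simp [PySem.List.pyGetD, h]
      simp only [this, inner_eq]
  rw [hfun]
  exact PySem.List.foldl_pyRange_zero_pyGetD' l "" pvStep 0

-- cari_alt_go returns 0 when nothing matches
theorem go_zero (m : List String) (h : m.any (· ∈ gejalaRef) = false) :
    cari_alt_go m = 0 := by
  induction m with
  | nil => rfl
  | cons x xs ih =>
    simp only [List.any_cons, Bool.or_eq_false_iff] at h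
    simp only [cari_alt_go]
    rw [if_neg (by simpa using h.1)]
    exact ih h.2

-- the left fold of pvStep equals B's short-circuiting reverse scan
theorem fold_eq_go (l : List String) (acc : Int) :
    l.foldl pvStep acc
    = if l.any (· ∈ gejalaRef) then cari_alt_go l.reverse else acc := by
  induction l using List.reverseRecOn generalizing acc with
  | nil => simp
  | append_singleton l' x ih =>
    rw [List.foldl_append]
    simp only [List.foldl, List.reverse_append, List.reverse_singleton,
      List.singleton_append, List.any_append, List.any_cons, List.any_nil]
    by_cases hx : x ∈ gejalaRef
    · simp [cari_alt_go, hx, pvStep]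
    · rw [ih acc]
      simp [cari_alt_go, hx, pvStep]

-- ===== VERDICT (by name: the statement is the Claim_ definition above) =====
theorem cari_data_diare_dewasa_spec : Claim_equal_cari_data_diare_dewasa := by
  intro l _
  unfold Spec_cari_data_diare_dewasa cari_data_diare_dewasa_alt
  rw [outer_fold, fold_eq_go]
  by_cases h : l.any (· ∈ gejalaRef)
  · rw [if_pos h]
  · rw [if_neg h, go_zero]
    simpa using h
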